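-- pv_equiv track=rewrite | github.com/liquidcore7/guesswho-bot | image.py | optimalmode
-- ===== SOURCE A (Python) =====
-- def optimalmode(imgsz):
--     for i in range(7, 23):
--         if imgsz[0] % i == 0 and imgsz[1] % i == 0:
--             return i
--         else:
--             pass
--     else:
--         return 10
-- ===== SOURCE B (Python) =====
-- def optimalmode(imgsz):
--     # Euclid's algorithm: reduce both dimensions to a single gcd g,
--     # then scan for the first i in 7..22 dividing g.
--     a, b = abs(imgsz[0]), abs(imgsz[1])
--     while b:
--         a, b = b, a % b
--     for i in range(7, 23):
--         if a % i == 0: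
--             return i
--     return 10
-- ===== Notes on version B (the rewrite author's own statement) =====
-- stated objective: alternative
-- what changed: B first collapses both dimensions into a single value g = gcd(|w|,|h|) via Euclid's algorithm, then scans 7..22 testing only g % i == 0, instead of A's loop testing both dimensions each iteration.
import Mathlib
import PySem

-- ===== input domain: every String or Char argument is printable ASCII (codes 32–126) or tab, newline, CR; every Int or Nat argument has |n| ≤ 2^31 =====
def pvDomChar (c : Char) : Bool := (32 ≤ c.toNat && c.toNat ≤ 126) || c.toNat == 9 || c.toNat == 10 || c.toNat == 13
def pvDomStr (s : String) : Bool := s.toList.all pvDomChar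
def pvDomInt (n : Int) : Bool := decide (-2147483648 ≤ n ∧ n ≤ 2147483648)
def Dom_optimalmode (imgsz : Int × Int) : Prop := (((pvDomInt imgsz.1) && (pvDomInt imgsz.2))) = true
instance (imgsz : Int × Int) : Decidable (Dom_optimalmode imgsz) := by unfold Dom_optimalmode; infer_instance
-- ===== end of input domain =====

-- B computes gcd(|w|,|h|) by Euclid's loop and scans 7..22 against that single value,
-- instead of A's per-iteration test of both dimensions; objective: alternative decomposition.

-- ===== PORT A =====
-- the for-loop over range(7, 23): first i dividing both dims, else 10
def pvLoopA : List Int → Int → Int → Int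
  | [], _, _ => 10
  | i :: rest, a, b =>
    if PySem.Int.mod a i == 0 && PySem.Int.mod b i == 0 then i
    else pvLoopA rest a b

def optimalmode (imgsz : Int × Int) : Int :=
  pvLoopA (PySem.List.pyRange 7 23 1) imgsz.1 imgsz.2

-- ===== PORT B =====
-- termination helper for the Euclid while-loop (cited by decreasing_by)
theorem pvMod_natAbs_lt (a b : Int) (hb0 : b ≠ 0) :
    (PySem.Int.mod a b).natAbs < b.natAbs := by
  rcases lt_trichotomy b 0 with h | h | h
  · have := PySem.Int.mod_neg_bounds a h
    omega
  · exact absurd h hb0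
  · have h1 := PySem.Int.mod_nonneg a h
    have h2 := PySem.Int.mod_lt a h
    omega

-- while b: a, b = b, a % b
def pvGcdLoop (a b : Int) : Int :=
  if hb : b = 0 then a else pvGcdLoop b (PySem.Int.mod a b)
termination_by b.natAbs
decreasing_by exact pvMod_natAbs_lt a b hb

-- the for-loop over range(7, 23): first i dividing g, else 10
def pvLoopB : List Int → Int → Int
  | [], _ => 10
  | i :: rest, g =>
    if PySem.Int.mod g i == 0 then i else pvLoopB rest g

def optimalmode_alt (imgsz : Int × Int) : Int :=
  pvLoopB (PySem.List.pyRange 7 23 1) (pvGcdLoop |imgsz.1| |imgsz.2|)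

-- ===== PRECONDITION & SPEC =====
def Spec_optimalmode (imgsz : Int × Int) (out : Int) : Prop := out = optimalmode_alt imgsz
instance (imgsz : Int × Int) (out : Int) : Decidable (Spec_optimalmode imgsz out) := by unfold Spec_optimalmode; infer_instance

-- ===== CLAIM (what is proved, stated in full; the proofs are below) =====
def Claim_equal_optimalmode : Prop := ∀ (imgsz : Int × Int), Dom_optimalmode imgsz → Spec_optimalmode imgsz (optimalmode imgsz)

-- ===== LEMMAS AND PROOFS =====

-- ===== VERDICT (by name: the statement is the Claim_ definition above) =====
-- the Euclid loop computes Int.gcd (for nonneg inputs)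
theorem pvGcdLoop_eq (a b : Int) (ha : 0 ≤ a) (hb : 0 ≤ b) :
    pvGcdLoop a b = (Int.gcd a b : Int) := by
  induction hn : b.natAbs using Nat.strong_induction_on generalizing a b with
  | _ n ih =>
    rw [pvGcdLoop]
    split_ifs with h0
    · subst h0
      rw [Int.gcd_zero_right]
      omega
    · have hbpos : 0 < b := lt_of_le_of_ne hb (Ne.symm h0)
      have hm : PySem.Int.mod a b = a % b := PySem.Int.mod_eq_emod_of_pos hbpos
      have h1 : 0 ≤ a % b := Int.emod_nonneg a (ne_of_gt hbpos)
      have h2 : (a % b).natAbs < n := by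
        have := Int.emod_lt_of_pos a hbpos
        omega
      rw [hm, ih _ h2 b (a % b) hb h1 rfl]
      have habs : (a % b).natAbs = a.natAbs % b.natAbs := by
        have e1 : (a.natAbs : Int) = a := by omega
        have e2 : (b.natAbs : Int) = b := by omega
        have e3 : ((a.natAbs % b.natAbs : Nat) : Int) = a % b := by
          push_cast
          rw [abs_of_nonneg ha, abs_of_nonneg hb]
        omega
      congr 1
      rw [Int.gcd_def, Int.gcd_def, habs, Nat.gcd_comm, ← Nat.gcd_rec, Nat.gcd_comm]

-- the two scans agree because i divides both dims iff i divides their gcd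
theorem pvLoop_eq (l : List Int) (a b : Int) :
    pvLoopA l a b = pvLoopB l (Int.gcd a b : Int) := by
  induction l with
  | nil => rfl
  | cons i rest ih =>
    have hc : ((PySem.Int.mod a i == 0) && (PySem.Int.mod b i == 0))
        = (PySem.Int.mod (Int.gcd a b : Int) i == 0) := by
      rw [Bool.eq_iff_iff]
      simp only [Bool.and_eq_true, beq_iff_eq, PySem.Int.mod_eq_zero_iff_dvd]
      constructor
      · rintro ⟨ha, hb⟩
        have hd : i.natAbs ∣ Int.gcd a b :=
          Nat.dvd_gcd (Int.natAbs_dvd_natAbs.mpr ha) (Int.natAbs_dvd_natAbs.mpr hb)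
        exact Int.natAbs_dvd.mp (Int.natCast_dvd_natCast.mpr hd)
      · intro h
        exact ⟨h.trans (Int.gcd_dvd_left a b), h.trans (Int.gcd_dvd_right a b)⟩
    simp only [pvLoopA, pvLoopB, hc, ih]

theorem optimalmode_spec : Claim_equal_optimalmode := by
  intro imgsz _
  unfold Spec_optimalmode optimalmode optimalmode_alt
  rw [pvLoop_eq, pvGcdLoop_eq _ _ (abs_nonneg _) (abs_nonneg _)]
  congr 2
  rw [Int.gcd_def, Int.gcd_def, Int.natAbs_abs, Int.natAbs_abs]
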